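-- pv_equiv track=rewrite | github.com/bertalanpasztor/python-utils | sql_helper/insert_help.py | find_value_position
-- ===== SOURCE A (Python) =====
-- def find_value_position(sql, raw_values, value_index):
--     # Find the start position of the VALUES clause
--     values_start = sql.lower().find("values")
--     if values_start == -1:
--         return None, None
--     paren_start = sql.find("(", values_start)
--     if paren_start == -1:
--         return None, None
--     # Now, walk through raw_values to find the N-th value's position
--     pos_in_sql = paren_start + 1
--     in_string = False
--     current_index = 0
--     value_start = pos_in_sql
--     for i, char in enumerate(raw_values):
--         if char == "'" and (i == 0 or raw_values[i-1] != "\\"):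
--             in_string = not in_string
--         if char == ',' and not in_string:
--             if current_index == value_index:
--                 value_end = pos_in_sql
--                 return value_start, value_end
--             current_index += 1
--             value_start = pos_in_sql + 1
--         pos_in_sql += 1
--     # Last value
--     if current_index == value_index:
--         value_end = pos_in_sql
--         return value_start, value_end
--     return None, None
-- ===== SOURCE B (Python) =====
-- def find_value_position(sql, raw_values, value_index):
--     # Locate the VALUES clause and its opening parenthesis (same as the original).
--     values_start = sql.lower().find("values")
--     if values_start == -1:
--         return None, None
--     paren_start = sql.find("(", values_start)
--     if paren_start == -1:
--         return None, None
--     base = paren_start + 1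
--     # One scan: collect offsets of all top-level (unquoted) commas.
--     commas = []
--     in_string = False
--     prev = None
--     for i, ch in enumerate(raw_values):
--         if ch == "'" and prev != "\\":
--             in_string = not in_string
--         if ch == ',' and not in_string:
--             commas.append(i)
--         prev = ch
--     # Boundaries by arithmetic on the comma list.
--     if 0 <= value_index <= len(commas):
--         start = base if value_index == 0 else base + commas[value_index - 1] + 1
--         end = base + commas[value_index] if value_index < len(commas) else base + len(raw_values)
--         return start, end
--     return None, None
-- ===== Notes on version B (the rewrite author's own statement) =====
-- stated objective: alternative
-- what changed: Replaced A's stateful walk (running value counter, running start position, early return from inside the loop) with one scan that collects the offsets of all top-level commas, followed by pure index arithmetic on that comma list to compute the value's start and end.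
import Mathlib
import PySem

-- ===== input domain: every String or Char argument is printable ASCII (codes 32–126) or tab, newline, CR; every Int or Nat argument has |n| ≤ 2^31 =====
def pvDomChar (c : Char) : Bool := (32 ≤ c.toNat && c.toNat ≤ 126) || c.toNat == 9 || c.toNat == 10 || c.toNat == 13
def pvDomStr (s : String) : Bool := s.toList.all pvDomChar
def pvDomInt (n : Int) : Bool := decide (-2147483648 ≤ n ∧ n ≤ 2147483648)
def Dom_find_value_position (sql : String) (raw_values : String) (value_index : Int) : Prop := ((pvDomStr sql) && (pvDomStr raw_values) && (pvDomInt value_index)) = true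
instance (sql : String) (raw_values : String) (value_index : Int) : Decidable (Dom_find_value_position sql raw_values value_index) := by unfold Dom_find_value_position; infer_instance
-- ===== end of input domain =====

-- B replaces A's stateful walk (current index, running start, early return) by one comma-collecting
-- scan followed by pure arithmetic on the comma-position list (objective: alternative decomposition).

-- ===== PORT A =====
-- A's for-loop over enumerate(raw_values): prev carries raw_values[i-1] (none ⟺ i == 0),
-- so the quote test `i == 0 or raw_values[i-1] != "\\"` is exactly `prev ≠ some '\\'`.
def findValueLoop (value_index : Int) : List Char → Option Char → Bool → Int → Int → Int → Option Int × Option Int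
  | [], _, _, current_index, value_start, pos_in_sql =>
      if current_index = value_index then (some value_start, some pos_in_sql) else (none, none)
  | c :: rest, prev, in_string, current_index, value_start, pos_in_sql =>
      let in_string' := if c = '\'' ∧ prev ≠ some '\\' then !in_string else in_string
      if c = ',' ∧ in_string' = false then
        if current_index = value_index then (some value_start, some pos_in_sql)
        else findValueLoop value_index rest (some c) in_string' (current_index + 1) (pos_in_sql + 1) (pos_in_sql + 1)
      else findValueLoop value_index rest (some c) in_string' current_index value_start (pos_in_sql + 1)

def find_value_position (sql : String) (raw_values : String) (value_index : Int) : Option Int × Option Int :=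
  let values_start := PySem.Str.find (PySem.Str.lower sql) "values"
  if values_start = -1 then (none, none)
  else
    let paren_start := PySem.Str.findFrom sql "(" values_start
    if paren_start = -1 then (none, none)
    else
      findValueLoop value_index raw_values.toList none false 0 (paren_start + 1) (paren_start + 1)

-- ===== PORT B =====
-- B's single scan collecting the offsets of all top-level commas (same prev convention as A's port).
def topCommas : List Char → Option Char → Bool → Int → List Int
  | [], _, _, _ => []
  | c :: rest, prev, in_string, i =>
      let in_string' := if c = '\'' ∧ prev ≠ some '\\' then !in_string else in_string
      if c = ',' ∧ in_string' = false then i :: topCommas rest (some c) in_string' (i + 1)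
      else topCommas rest (some c) in_string' (i + 1)

-- commas[j] for an index Source B only uses in range; the default 0 is a totalization guard.
def getCommaI (K : List Int) (j : Int) : Int := K.getD j.toNat 0

def find_value_position_alt (sql : String) (raw_values : String) (value_index : Int) : Option Int × Option Int :=
  let values_start := PySem.Str.find (PySem.Str.lower sql) "values"
  if values_start = -1 then (none, none)
  else
    let paren_start := PySem.Str.findFrom sql "(" values_start
    if paren_start = -1 then (none, none)
    else
      let base := paren_start + 1
      let commas := topCommas raw_values.toList none false 0
      if 0 ≤ value_index ∧ value_index ≤ (commas.length : Int) then
        (some (if value_index = 0 then base else base + getCommaI commas (value_index - 1) + 1),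
         some (if value_index < (commas.length : Int) then base + getCommaI commas value_index
               else base + (raw_values.toList.length : Int)))
      else (none, none)

-- ===== PRECONDITION & SPEC =====
def Spec_find_value_position (sql : String) (raw_values : String) (value_index : Int) (out : Option Int × Option Int) : Prop := out = find_value_position_alt sql raw_values value_index
instance (sql : String) (raw_values : String) (value_index : Int) (out : Option Int × Option Int) : Decidable (Spec_find_value_position sql raw_values value_index out) := by unfold Spec_find_value_position; infer_instance

-- ===== CLAIM (what is proved, stated in full; the proofs are below) =====
def Claim_equal_find_value_position : Prop := ∀ (sql : String) (raw_values : String) (value_index : Int), Dom_find_value_position sql raw_values value_index → Spec_find_value_position sql raw_values value_index (find_value_position sql raw_values value_index)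

-- ===== LEMMAS AND PROOFS =====

theorem findValueLoop_eq_commas (value_index base : Int) :
    ∀ (cs : List Char) (prev : Option Char) (in_string : Bool) (current_index value_start s : Int),
      findValueLoop value_index cs prev in_string current_index value_start (base + s) =
        (let K := topCommas cs prev in_string s
         if current_index ≤ value_index ∧ value_index ≤ current_index + (K.length : Int) then
           (some (if value_index = current_index then value_start
                  else base + getCommaI K (value_index - current_index - 1) + 1),
            some (if value_index - current_index < (K.length : Int)
                  then base + getCommaI K (value_index - current_index)
                  else base + s + (cs.length : Int)))
         else (none, none)) := by
  intro cs
  induction cs with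
  | nil =>
      intro prev in_string current_index value_start s
      simp only [findValueLoop, topCommas, List.length_nil]
      by_cases h : current_index = value_index
      · have hc : current_index ≤ value_index ∧ value_index ≤ current_index + ((0:Nat):Int) := by omega
        rw [if_pos h, if_pos hc, if_pos h.symm]
        simp only [Nat.cast_zero, Int.add_zero]
        rw [if_neg (by omega : ¬ value_index - current_index < (0:Int))]
      · rw [if_neg h, if_neg (by omega : ¬ (current_index ≤ value_index ∧ value_index ≤ current_index + ((0:Nat):Int)))]
  | cons c rest ih =>
      intro prev in_string current_index value_start s
      simp only [findValueLoop, topCommas]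
      set in_string' := if c = '\'' ∧ prev ≠ some '\\' then !in_string else in_string with hstr
      by_cases hc : c = ',' ∧ in_string' = false
      · simp only [if_pos hc]
        set K' := topCommas rest (some c) in_string' (s + 1) with hK'
        by_cases hi : current_index = value_index
        · -- early return at this comma
          subst hi
          have hcond : current_index ≤ current_index ∧
              current_index ≤ current_index + ((s :: K').length : Int) := by
            simp only [List.length_cons]; push_cast; omega
          rw [if_pos rfl, if_pos hcond, if_pos rfl,
              if_pos (by simp only [List.length_cons]; push_cast; omega
                      : current_index - current_index < ((s :: K').length : Int))]
          have h0 : (current_index - current_index).toNat = 0 := by omega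
          simp [getCommaI]
        · rw [if_neg hi]
          have harith : base + s + 1 = base + (s + 1) := by ring
          rw [harith, ih]
          simp only [← hK', List.length_cons]
          by_cases hrng : current_index + 1 ≤ value_index ∧
              value_index ≤ current_index + 1 + (K'.length : Int)
          · have hrng' : current_index ≤ value_index ∧
                value_index ≤ current_index + ((K'.length + 1 : Nat) : Int) := by
              push_cast; push_cast at hrng; omega
            rw [if_pos hrng, if_pos hrng']
            have hne : value_index ≠ current_index := fun h => hi h.symm
            rw [if_neg hne]
            simp only [Prod.mk.injEq, Option.some.injEq]
            constructor
            · by_cases h1 : value_index = current_index + 1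
              · have ht : (value_index - current_index - 1).toNat = 0 := by omega
                simp only [if_pos h1, getCommaI, ht]
                simp only [List.getD, List.getElem?_cons_zero, Option.getD_some]
                omega
              · have h2 : (value_index - current_index - 1).toNat
                    = (value_index - (current_index + 1) - 1).toNat + 1 := by omega
                rw [if_neg h1]
                simp [getCommaI, h2]
            · by_cases h3 : value_index - (current_index + 1) < (K'.length : Int)
              · have h4 : value_index - current_index < ((K'.length + 1 : Nat) : Int) := by
                  push_cast; push_cast at h3; omega
                have h5 : (value_index - current_index).toNat
                    = (value_index - (current_index + 1)).toNat + 1 := by omega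
                rw [if_pos h3, if_pos h4]
                simp [getCommaI, h5]
              · have h4 : ¬ (value_index - current_index < ((K'.length + 1 : Nat) : Int)) := by
                  push_cast; push_cast at h3; omega
                rw [if_neg h3, if_neg h4]
                push_cast; ring
          · have hrng' : ¬ (current_index ≤ value_index ∧
                value_index ≤ current_index + ((K'.length + 1 : Nat) : Int)) := by
              push_cast; push_cast at hrng; omega
            rw [if_neg hrng, if_neg hrng']
      · simp only [if_neg hc]
        have harith : base + s + 1 = base + (s + 1) := by ring
        rw [harith, ih]
        simp only [List.length_cons]
        push_cast
        ring_nf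

-- ===== VERDICT (by name: the statement is the Claim_ definition above) =====
theorem find_value_position_spec : Claim_equal_find_value_position := by
  intro sql raw_values value_index _
  simp only [Spec_find_value_position, find_value_position, find_value_position_alt]
  by_cases h1 : PySem.Str.find (PySem.Str.lower sql) "values" = -1
  · rw [if_pos h1, if_pos h1]
  · rw [if_neg h1, if_neg h1]
    by_cases h2 : PySem.Str.findFrom sql "(" (PySem.Str.find (PySem.Str.lower sql) "values") = -1
    · rw [if_pos h2, if_pos h2]
    · rw [if_neg h2, if_neg h2]
      set p := PySem.Str.findFrom sql "(" (PySem.Str.find (PySem.Str.lower sql) "values")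
      have hmain := findValueLoop_eq_commas value_index (p + 1) raw_values.toList none false 0 (p + 1) 0
      rw [show p + 1 + 0 = p + 1 by ring] at hmain
      rw [hmain]
      simp only [sub_zero, zero_add]
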